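-- pv_equiv track=rewrite | github.com/brettviren/pochoir | pochoir/gen_pcb_quarter.py | draw_quarter_circle
-- ===== SOURCE A (Python) =====
-- def draw_quarter_circle(x0,y0,r):
--     """
--     Sorted by x-index IDs of an apper-right quarter-circle on a given grid
--     x0,y0,r are in index units
--
--     draws IV quadrant
--     """
--     x=0
--     y=r
--     d=3-2*r
--     id_circ1=[]
--     shifted=[]
--     id_circ1.append((x,y))
--     while x<=y :
--         if d<0:
--             d=d+4*x+6
--             x=x+1
--             id_circ1.append((x,y))
--             id_circ1.append((y,x))
--         if d>=0:
--             d=d+4*(x-y)+6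
--             x=x+1
--             y=y-1
--             id_circ1.append((x,y))
--             id_circ1.append((y,x))
--     id_circ1.sort(key = lambda x: x[0])
--     for id in id_circ1:
--         sh=(id[0]+x0,id[1]+y0)
--         shifted.append(sh)
--     return shifted
-- ===== SOURCE B (Python) =====
-- def draw_quarter_circle(x0, y0, r):
--     """
--     Sorted by x-index IDs of an upper-right quarter-circle on a given grid.
--     Same values as the original, but the O(n log n) comparison sort is
--     replaced by bucketing on the (bounded, integer) x key while the points
--     are generated: each point is dropped, already shifted, into the bucket
--     of its unshifted x, and the buckets are concatenated in key order.
--     """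
--     buckets = {}
--
--     def put(px, py):
--         buckets.setdefault(px, []).append((px + x0, py + y0))
--
--     x = 0
--     y = r
--     d = 3 - 2 * r
--     put(x, y)
--     while x <= y:
--         if d < 0:
--             d = d + 4 * x + 6
--             x = x + 1
--             put(x, y)
--             put(y, x)
--         if d >= 0:
--             d = d + 4 * (x - y) + 6
--             x = x + 1
--             y = y - 1
--             put(x, y)
--             put(y, x)
--     out = []
--     for k in range(min(buckets), max(buckets) + 1):
--         out += buckets.get(k, [])
--     return out
-- ===== Notes on version B (the rewrite author's own statement) =====
-- stated objective: alternative
-- what changed: The comparison sort (plus separate shift pass) is replaced by bucketing: each point is dropped, already shifted, into a bucket keyed by its unshifted x while it is generated, and the buckets are concatenated in increasing key order.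
import Mathlib
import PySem

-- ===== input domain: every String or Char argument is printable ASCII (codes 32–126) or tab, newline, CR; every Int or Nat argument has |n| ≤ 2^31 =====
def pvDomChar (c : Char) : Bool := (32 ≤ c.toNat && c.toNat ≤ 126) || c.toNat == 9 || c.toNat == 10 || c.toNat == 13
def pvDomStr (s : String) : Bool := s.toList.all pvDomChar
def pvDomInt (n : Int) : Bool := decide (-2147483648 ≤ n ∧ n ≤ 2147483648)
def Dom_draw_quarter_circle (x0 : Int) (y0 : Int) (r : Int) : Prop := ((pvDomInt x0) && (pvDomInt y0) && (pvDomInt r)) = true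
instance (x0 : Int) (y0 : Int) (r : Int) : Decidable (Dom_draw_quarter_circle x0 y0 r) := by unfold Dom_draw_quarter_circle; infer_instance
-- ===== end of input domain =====

-- B replaces A's comparison sort (and separate shift pass) by bucketing each point, already
-- shifted, under its unshifted x key while it is generated, concatenating buckets in key order
-- (alternative algorithm; not measured faster: timsort handles A's two-run list at C speed).

-- ===== PORT A =====
-- the while loop: returns the points appended after the initial (0, r)
def pvGenA (x y d : Int) : List (Int × Int) :=
  if x ≤ y then
    if d < 0 then
      -- 'if d<0' branch fires; the sequential 'if d>=0' then tests the updated d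
      if 0 ≤ d + 4 * x + 6 then
        (x + 1, y) :: (y, x + 1) :: (x + 2, y - 1) :: (y - 1, x + 2) ::
          pvGenA (x + 2) (y - 1) ((d + 4 * x + 6) + 4 * ((x + 1) - y) + 6)
      else
        (x + 1, y) :: (y, x + 1) :: pvGenA (x + 1) y (d + 4 * x + 6)
    else
      (x + 1, y - 1) :: (y - 1, x + 1) :: pvGenA (x + 1) (y - 1) (d + 4 * (x - y) + 6)
  else []
termination_by (y - x + 1).toNat
decreasing_by all_goals simp_wf; omega

def draw_quarter_circle (x0 : Int) (y0 : Int) (r : Int) : List (Int × Int) :=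
  let id_circ1 : List (Int × Int) := (0, r) :: pvGenA 0 r (3 - 2 * r)
  let sortedL := PySem.List.sorted id_circ1 (fun p => p.1) false
  sortedL.foldl (fun shifted id => shifted ++ [(id.1 + x0, id.2 + y0)]) []

-- ===== PORT B =====
-- put(px, py): buckets.setdefault(px, []).append((px + x0, py + y0))
def pvPut (x0 y0 : Int) (b : PySem.Dict Int (List (Int × Int))) (px py : Int) :
    PySem.Dict Int (List (Int × Int)) :=
  b.modify px [] (fun l => l ++ [(px + x0, py + y0)])

-- the while loop of B, threading the bucket dict
def pvGenB (x0 y0 : Int) (x y d : Int) (b : PySem.Dict Int (List (Int × Int))) :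
    PySem.Dict Int (List (Int × Int)) :=
  if x ≤ y then
    if d < 0 then
      if 0 ≤ d + 4 * x + 6 then
        pvGenB x0 y0 (x + 2) (y - 1) ((d + 4 * x + 6) + 4 * ((x + 1) - y) + 6)
          (pvPut x0 y0 (pvPut x0 y0 (pvPut x0 y0 (pvPut x0 y0 b (x + 1) y) y (x + 1)) (x + 2) (y - 1)) (y - 1) (x + 2))
      else
        pvGenB x0 y0 (x + 1) y (d + 4 * x + 6)
          (pvPut x0 y0 (pvPut x0 y0 b (x + 1) y) y (x + 1))
    else
      pvGenB x0 y0 (x + 1) (y - 1) (d + 4 * (x - y) + 6)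
        (pvPut x0 y0 (pvPut x0 y0 b (x + 1) (y - 1)) (y - 1) (x + 1))
  else b
termination_by (y - x + 1).toNat
decreasing_by all_goals simp_wf; omega

def draw_quarter_circle_alt (x0 : Int) (y0 : Int) (r : Int) : List (Int × Int) :=
  let b := pvGenB x0 y0 0 r (3 - 2 * r) (pvPut x0 y0 PySem.Dict.empty 0 r)
  -- min(buckets) / max(buckets); the dict is never empty, so the none branch is unreachable
  match PySem.List.min? b.keys (fun k => k), PySem.List.max? b.keys (fun k => k) with
  | some lo, some hi =>
      (PySem.List.pyRange lo (hi + 1) 1).foldl (fun out k => out ++ b.getD k []) []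
  | _, _ => []

-- ===== PRECONDITION & SPEC =====
def Spec_draw_quarter_circle (x0 : Int) (y0 : Int) (r : Int) (out : List (Int × Int)) : Prop := out = draw_quarter_circle_alt x0 y0 r
instance (x0 : Int) (y0 : Int) (r : Int) (out : List (Int × Int)) : Decidable (Spec_draw_quarter_circle x0 y0 r out) := by unfold Spec_draw_quarter_circle; infer_instance

-- ===== CLAIM (what is proved, stated in full; the proofs are below) =====
def Claim_equal_draw_quarter_circle : Prop := ∀ (x0 : Int) (y0 : Int) (r : Int), Dom_draw_quarter_circle x0 y0 r → Spec_draw_quarter_circle x0 y0 r (draw_quarter_circle x0 y0 r)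

-- ===== LEMMAS AND PROOFS =====

-- B's loop is the fold of put over the points A's loop generates
lemma pvGenB_eq_foldl (x0 y0 : Int) : ∀ (x y d : Int) (b : PySem.Dict Int (List (Int × Int))),
    pvGenB x0 y0 x y d b = (pvGenA x y d).foldl (fun b p => pvPut x0 y0 b p.1 p.2) b := by
  intro x y d
  fun_induction pvGenA x y d with
  | case1 x y d hxy hd hd1 ih =>
      intro b; rw [pvGenB]; simp [hxy, hd, hd1, ih]
  | case2 x y d hxy hd hd1 ih =>
      intro b; rw [pvGenB]; simp [hxy, hd, hd1, ih]
  | case3 x y d hxy hd ih =>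
      intro b; rw [pvGenB]; simp [hxy, hd, ih]
  | case4 x y d hxy =>
      intro b; rw [pvGenB]; simp [hxy]

lemma getD_pvPut (x0 y0 : Int) (b : PySem.Dict Int (List (Int × Int))) (px py k : Int) :
    (pvPut x0 y0 b px py).getD k [] =
      b.getD k [] ++ (if k = px then [(px + x0, py + y0)] else []) := by
  simp only [pvPut, PySem.Dict.modify, PySem.Dict.getD_insert]
  split_ifs with h
  · subst h; rfl
  · simp

lemma getD_foldl_put (x0 y0 : Int) : ∀ (P : List (Int × Int)) (b : PySem.Dict Int (List (Int × Int))) (k : Int),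
    (P.foldl (fun b p => pvPut x0 y0 b p.1 p.2) b).getD k [] =
      b.getD k [] ++ (P.filter (fun q => q.1 == k)).map (fun q => (q.1 + x0, q.2 + y0)) := by
  intro P
  induction P with
  | nil => simp
  | cons p P ih =>
      intro b k
      simp only [List.foldl_cons, ih, getD_pvPut, List.filter_cons]
      by_cases h : p.1 = k
      · simp [h, List.append_assoc]
      · simp [h, beq_iff_eq, Ne.symm h]

lemma mem_keys_foldl_put (x0 y0 : Int) : ∀ (P : List (Int × Int)) (b : PySem.Dict Int (List (Int × Int))) (a : Int),
    a ∈ (P.foldl (fun b p => pvPut x0 y0 b p.1 p.2) b).keys ↔ a ∈ b.keys ∨ a ∈ P.map (·.1) := by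
  intro P
  induction P with
  | nil => simp
  | cons p P ih =>
      intro b a
      rw [List.foldl_cons, ih]
      simp only [pvPut, PySem.Dict.modify, PySem.Dict.mem_keys_insert, List.map_cons,
        List.mem_cons]
      tauto

-- min/max with the identity key depend only on membership
lemma min?_id_eq_of_mem_iff (xs ys : List Int) (hy : ys ≠ [])
    (h : ∀ a, a ∈ xs ↔ a ∈ ys) :
    PySem.List.min? xs (fun k => k) = PySem.List.min? ys (fun k => k) := by
  have hx : xs ≠ [] := by
    intro hx; subst hx
    rcases List.exists_mem_of_ne_nil ys hy with ⟨a, ha⟩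
    exact absurd ((h a).mpr ha) (List.not_mem_nil)
  rcases Option.ne_none_iff_exists'.mp (fun hn => hx ((PySem.List.min?_eq_none_iff xs (fun k : Int => k)).mp hn)) with ⟨m, hm⟩
  rcases Option.ne_none_iff_exists'.mp (fun hn => hy ((PySem.List.min?_eq_none_iff ys (fun k : Int => k)).mp hn)) with ⟨m', hm'⟩
  rw [hm, hm']
  have h1 : m ≤ m' := PySem.List.min?_isMin hm m' ((h m').mpr (PySem.List.min?_mem hm'))
  have h2 : m' ≤ m := PySem.List.min?_isMin hm' m ((h m).mp (PySem.List.min?_mem hm))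
  simp [le_antisymm h1 h2]

lemma max?_id_eq_of_mem_iff (xs ys : List Int) (hy : ys ≠ [])
    (h : ∀ a, a ∈ xs ↔ a ∈ ys) :
    PySem.List.max? xs (fun k => k) = PySem.List.max? ys (fun k => k) := by
  have hx : xs ≠ [] := by
    intro hx; subst hx
    rcases List.exists_mem_of_ne_nil ys hy with ⟨a, ha⟩
    exact absurd ((h a).mpr ha) (List.not_mem_nil)
  rcases Option.ne_none_iff_exists'.mp (fun hn => hx ((PySem.List.max?_eq_none_iff xs (fun k : Int => k)).mp hn)) with ⟨m, hm⟩
  rcases Option.ne_none_iff_exists'.mp (fun hn => hy ((PySem.List.max?_eq_none_iff ys (fun k : Int => k)).mp hn)) with ⟨m', hm'⟩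
  rw [hm, hm']
  have h1 : m' ≤ m := PySem.List.max?_isMax hm m' ((h m').mpr (PySem.List.max?_mem hm'))
  have h2 : m ≤ m' := PySem.List.max?_isMax hm' m ((h m).mp (PySem.List.max?_mem hm))
  simp [le_antisymm h2 h1]

lemma insertBy_append_left {α : Type} (bef : α → α → Bool) (x : α) :
    ∀ (ys zs : List α), (∀ y ∈ ys, bef x y = false) →
      PySem.List.insertBy bef x (ys ++ zs) = ys ++ PySem.List.insertBy bef x zs := by
  intro ys
  induction ys with
  | nil => simp
  | cons y ys ih =>
      intro zs h
      have hy : bef x y = false := h y (List.mem_cons_self)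
      simp only [List.cons_append, PySem.List.insertBy, hy]
      simp only [Bool.false_eq_true, if_false]
      rw [ih zs (fun y hy => h y (List.mem_cons_of_mem _ hy))]

lemma insertBy_all_before {α : Type} (bef : α → α → Bool) (x : α) (zs : List α)
    (h : ∀ y ∈ zs, bef x y = true) :
    PySem.List.insertBy bef x zs = x :: zs := by
  cases zs with
  | nil => rfl
  | cons z zs => simp [PySem.List.insertBy, h z List.mem_cons_self]

-- stable sort by a bounded integer key = concatenation of the key buckets in key order
lemma sorted_eq_flatMap_filter :
    ∀ (P : List (Int × Int)) (lo hi : Int), (∀ p ∈ P, lo ≤ p.1 ∧ p.1 ≤ hi) →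
      PySem.List.sorted P (fun p => p.1) false =
        (PySem.List.pyRange lo (hi + 1) 1).flatMap (fun k => P.filter (fun q => q.1 == k)) := by
  intro P
  induction P using List.reverseRecOn with
  | nil => intro lo hi _; simp [PySem.List.sorted]
  | append_singleton P p ih =>
      intro lo hi h
      have hp := h p (by simp)
      have hP : ∀ q ∈ P, lo ≤ q.1 ∧ q.1 ≤ hi := fun q hq => h q (by simp [hq])
      have hs : PySem.List.sorted (P ++ [p]) (fun p => p.1) false =
          PySem.List.insertBy (fun a b => decide ((a : Int × Int).1 < b.1)) p
            (PySem.List.sorted P (fun p => p.1) false) := by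
        rw [PySem.List.sorted_eq_foldl_insertBy, PySem.List.sorted_eq_foldl_insertBy]
        simp [List.foldl_append]
      have hr1 : PySem.List.pyRange lo (hi + 1) 1 =
          PySem.List.pyRange lo p.1 1 ++ [p.1] ++ PySem.List.pyRange (p.1 + 1) (hi + 1) 1 := by
        rw [← PySem.List.pyRange_one_singleton p.1,
          ← PySem.List.pyRange_one_append lo p.1 (p.1 + 1) (by omega) (by omega),
          ← PySem.List.pyRange_one_append lo (p.1 + 1) (hi + 1) (by omega) (by omega)]
      have hfne : ∀ k : Int, k ≠ p.1 →
          (P ++ [p]).filter (fun q => q.1 == k) = P.filter (fun q => q.1 == k) := by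
        intro k hk
        rw [List.filter_append]
        simp [beq_false_of_ne (Ne.symm hk)]
      have hfeq : (P ++ [p]).filter (fun q => q.1 == p.1) =
          P.filter (fun q => q.1 == p.1) ++ [p] := by
        rw [List.filter_append]; simp
      -- the buckets of P ++ [p] in terms of the buckets of P
      have hR : (PySem.List.pyRange lo (hi + 1) 1).flatMap
            (fun k => (P ++ [p]).filter (fun q => q.1 == k)) =
          (PySem.List.pyRange lo p.1 1).flatMap (fun k => P.filter (fun q => q.1 == k)) ++
            (P.filter (fun q => q.1 == p.1) ++ [p]) ++
            (PySem.List.pyRange (p.1 + 1) (hi + 1) 1).flatMap (fun k => P.filter (fun q => q.1 == k)) := by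
        rw [hr1, List.flatMap_append, List.flatMap_append, List.flatMap_singleton, hfeq]
        congr 1
        congr 1
        · apply List.flatMap_congr
          intro k hk
          exact hfne k (by rcases PySem.List.mem_pyRange_one.mp hk with ⟨_, h2⟩; omega)
        · apply List.flatMap_congr
          intro k hk
          exact hfne k (by rcases PySem.List.mem_pyRange_one.mp hk with ⟨h1, _⟩; omega)
      rw [hR, hs, ih lo hi hP, hr1, List.flatMap_append, List.flatMap_append,
        List.flatMap_singleton]
      rw [insertBy_append_left _ p
        ((PySem.List.pyRange lo p.1 1).flatMap (fun k => P.filter (fun q => q.1 == k)) ++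
          P.filter (fun q => q.1 == p.1))
        ((PySem.List.pyRange (p.1 + 1) (hi + 1) 1).flatMap (fun k => P.filter (fun q => q.1 == k)))]
      · rw [insertBy_all_before]
        · simp [List.append_assoc]
        · intro q hq
          rcases List.mem_flatMap.mp hq with ⟨k, hk, hqk⟩
          have h1 := PySem.List.mem_pyRange_one.mp hk
          have h2 : q.1 = k := by simpa using (List.mem_filter.mp hqk).2
          simp only [decide_eq_true_eq]
          omega
      · intro q hq
        rcases List.mem_append.mp hq with hq | hq
        · rcases List.mem_flatMap.mp hq with ⟨k, hk, hqk⟩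
          have h1 := PySem.List.mem_pyRange_one.mp hk
          have h2 : q.1 = k := by simpa using (List.mem_filter.mp hqk).2
          simp only [decide_eq_false_iff_not]
          omega
        · have h2 : q.1 = p.1 := by simpa using (List.mem_filter.mp hq).2
          simp only [decide_eq_false_iff_not]
          omega

-- ===== VERDICT (by name: the statement is the Claim_ definition above) =====
theorem draw_quarter_circle_spec : Claim_equal_draw_quarter_circle := by
  intro x0 y0 r _
  unfold Spec_draw_quarter_circle draw_quarter_circle draw_quarter_circle_alt
  have hfold : pvGenB x0 y0 0 r (3 - 2 * r) (pvPut x0 y0 PySem.Dict.empty 0 r) =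
      ((0, r) :: pvGenA 0 r (3 - 2 * r)).foldl (fun b p => pvPut x0 y0 b p.1 p.2)
        PySem.Dict.empty := by
    rw [pvGenB_eq_foldl, List.foldl_cons]
  simp only [hfold]
  have hkeys : ∀ a : Int,
      a ∈ (((0, r) :: pvGenA 0 r (3 - 2 * r)).foldl (fun b p => pvPut x0 y0 b p.1 p.2)
        PySem.Dict.empty).keys ↔ a ∈ ((0, r) :: pvGenA 0 r (3 - 2 * r)).map (·.1) := by
    intro a
    rw [mem_keys_foldl_put]
    simp [PySem.Dict.empty, PySem.Dict.keys]
  have hgetD : ∀ k : Int,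
      (((0, r) :: pvGenA 0 r (3 - 2 * r)).foldl (fun b p => pvPut x0 y0 b p.1 p.2)
        PySem.Dict.empty).getD k [] =
      (((0, r) :: pvGenA 0 r (3 - 2 * r)).filter (fun q => q.1 == k)).map
        (fun q => (q.1 + x0, q.2 + y0)) := by
    intro k
    rw [getD_foldl_put]
    simp [PySem.Dict.empty, PySem.Dict.getD, PySem.Dict.get?]
  have hne : ((0, r) :: pvGenA 0 r (3 - 2 * r)).map (·.1) ≠ [] := by simp
  have hmin := min?_id_eq_of_mem_iff _ _ hne hkeys
  have hmax := max?_id_eq_of_mem_iff _ _ hne hkeys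
  rcases Option.ne_none_iff_exists'.mp (fun hn => hne
      ((PySem.List.min?_eq_none_iff (((0, r) :: pvGenA 0 r (3 - 2 * r)).map (·.1))
        (fun k : Int => k)).mp hn)) with ⟨lo, hlo⟩
  rcases Option.ne_none_iff_exists'.mp (fun hn => hne
      ((PySem.List.max?_eq_none_iff (((0, r) :: pvGenA 0 r (3 - 2 * r)).map (·.1))
        (fun k : Int => k)).mp hn)) with ⟨hi, hhi⟩
  rw [hmin, hmax, hlo, hhi]
  have hbound : ∀ p ∈ (0, r) :: pvGenA 0 r (3 - 2 * r), lo ≤ p.1 ∧ p.1 ≤ hi := by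
    intro p hp
    have hm : p.1 ∈ ((0, r) :: pvGenA 0 r (3 - 2 * r)).map (·.1) := List.mem_map_of_mem hp
    exact ⟨PySem.List.min?_isMin hlo p.1 hm, PySem.List.max?_isMax hhi p.1 hm⟩
  rw [PySem.List.foldl_append_singleton_eq_map,
    sorted_eq_flatMap_filter ((0, r) :: pvGenA 0 r (3 - 2 * r)) lo hi hbound]
  dsimp only
  rw [PySem.List.foldl_append_eq_flatMap]
  simp only [List.nil_append, List.map_flatMap]
  apply List.flatMap_congr
  intro k _
  rw [hgetD]
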